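-- pv_equiv track=rewrite | github.com/hoo01/CS61A | disc01/unique digit.py | has_digit
-- ===== SOURCE A (Python) =====
-- def has_digit(n,k):
--     """ return whether k is a digit in n.
--     >>> has_digit(10,1)
--     True
--     >>> has_digit(221,3)
--     False
--     """
--     assert k >= 0 and k < 10
--
--     while n > 0:
--         last = n % 10
--         n = n // 10
--         if last == k:
--             return True
--     return False
-- ===== SOURCE B (Python) =====
-- def has_digit(n, k):
--     """return whether k is a digit in n."""
--     assert k >= 0 and k < 10
--     return n > 0 and str(k) in str(n)
-- ===== Notes on version B (the rewrite author's own statement) =====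
-- stated objective: idiomatic
-- what changed: Replaces the manual divmod extraction loop by a single string-membership test: str(k) in str(n), guarded by n > 0 to match the original's while-loop condition.
import Mathlib
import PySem

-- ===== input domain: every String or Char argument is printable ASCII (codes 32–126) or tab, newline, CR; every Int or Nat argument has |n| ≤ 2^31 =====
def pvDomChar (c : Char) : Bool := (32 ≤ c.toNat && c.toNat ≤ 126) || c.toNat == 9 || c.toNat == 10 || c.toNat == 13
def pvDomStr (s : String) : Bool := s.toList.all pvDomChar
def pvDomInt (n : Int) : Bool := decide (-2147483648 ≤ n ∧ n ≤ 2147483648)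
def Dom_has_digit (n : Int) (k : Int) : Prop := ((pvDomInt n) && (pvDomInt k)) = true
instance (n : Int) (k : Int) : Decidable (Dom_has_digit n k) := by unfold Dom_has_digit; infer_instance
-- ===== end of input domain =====

-- B replaces A's divmod digit-extraction loop by a single string-membership test
-- (str(k) in str(n), guarded by n > 0); equivalence is proved on Pre_ (0 ≤ k < 10,
-- where A's assert passes).

-- ===== PORT A =====
-- the while-loop of A: while n > 0: last = n % 10; n = n // 10; if last == k: return True
def hasDigitLoop (n : Int) (k : Int) : Bool :=
  if _h : n > 0 then
    let last := PySem.Int.mod n 10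
    let n' := PySem.Int.floordiv n 10
    if last == k then true else hasDigitLoop n' k
  else false
termination_by n.toNat
decreasing_by
  simp only [PySem.Int.floordiv, Int.fdiv_eq_ediv]
  omega

def has_digit (n : Int) (k : Int) : Bool := hasDigitLoop n k

-- ===== PORT B =====
-- return n > 0 and str(k) in str(n)
def has_digit_alt (n : Int) (k : Int) : Bool :=
  decide (n > 0) && PySem.Str.isIn (PySem.Int.toStr k) (PySem.Int.toStr n)

-- ===== PRECONDITION & SPEC =====
-- A's assert raises AssertionError unless 0 <= k < 10; exactly those inputs are excluded.
def Pre_has_digit (n : Int) (k : Int) : Prop := 0 ≤ k ∧ k < 10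
instance (n : Int) (k : Int) : Decidable (Pre_has_digit n k) := by unfold Pre_has_digit; infer_instance

def pvWitness_has_digit : Int × Int := (221, 3)

def Spec_has_digit (n : Int) (k : Int) (out : Bool) : Prop := out = has_digit_alt n k
instance (n : Int) (k : Int) (out : Bool) : Decidable (Spec_has_digit n k out) := by unfold Spec_has_digit; infer_instance

-- ===== CLAIM (what is proved, stated in full; the proofs are below) =====
def Claim_equal_has_digit : Prop := ∀ (n : Int) (k : Int), Dom_has_digit n k → Pre_has_digit n k → Spec_has_digit n k (has_digit n k)

-- ===== LEMMAS AND PROOFS =====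

-- toDigitsCore appends its accumulator
theorem pvToDigitsCore_append (f : Nat) : ∀ (n : Nat) (ds : List Char),
    Nat.toDigitsCore 10 f n ds = Nat.toDigitsCore 10 f n [] ++ ds := by
  induction f with
  | zero => intro n ds; simp [Nat.toDigitsCore]
  | succ f ih =>
    intro n ds
    simp only [Nat.toDigitsCore]
    by_cases h : n / 10 = 0
    · simp [h]
    · simp only [h, if_false]
      rw [ih (n / 10) (Nat.digitChar (n % 10) :: ds), ih (n / 10) [Nat.digitChar (n % 10)]]
      simp

-- fuel irrelevance: any fuel > n gives the same digits
theorem pvToDigitsCore_fuel (n : Nat) : ∀ (f f' : Nat), n < f → n < f' →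
    Nat.toDigitsCore 10 f n [] = Nat.toDigitsCore 10 f' n [] := by
  induction n using Nat.strong_induction_on with
  | _ n ih =>
    intro f f' hf hf'
    obtain ⟨g, rfl⟩ : ∃ g, f = g + 1 := ⟨f - 1, by omega⟩
    obtain ⟨g', rfl⟩ : ∃ g', f' = g' + 1 := ⟨f' - 1, by omega⟩
    simp only [Nat.toDigitsCore]
    by_cases h : n / 10 = 0
    · simp [h]
    · simp only [h, if_false]
      rw [pvToDigitsCore_append g, pvToDigitsCore_append g',
        ih (n / 10) (by omega) g g' (by omega) (by omega)]

-- the recurrence of decimal printing for n ≥ 10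
theorem pvToDigits_step (n : Nat) (h : 10 ≤ n) :
    Nat.toDigits 10 n = Nat.toDigits 10 (n / 10) ++ [Nat.digitChar (n % 10)] := by
  show Nat.toDigitsCore 10 (n + 1) n [] = _
  simp only [Nat.toDigitsCore]
  have h0 : ¬ n / 10 = 0 := by omega
  simp only [h0, if_false]
  rw [pvToDigitsCore_append n]
  congr 1
  exact pvToDigitsCore_fuel (n / 10) n (n / 10 + 1) (by omega) (by omega)

theorem pvToDigits_small (n : Nat) (h : n < 10) :
    Nat.toDigits 10 n = [Nat.digitChar (n % 10)] := by
  show Nat.toDigitsCore 10 (n + 1) n [] = _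
  simp only [Nat.toDigitsCore]
  have h0 : n / 10 = 0 := by omega
  simp [h0]

theorem pvDigitChar_inj : ∀ a < 10, ∀ b < 10, Nat.digitChar a = Nat.digitChar b ↔ a = b := by decide

-- the loop finds k iff the digit character of k occurs in the decimal digits
theorem pvLoop_eq_mem (m : Nat) (k : Int) (hm : 0 < m) (hk0 : 0 ≤ k) (hk : k < 10) :
    hasDigitLoop (m : Int) k = decide (Nat.digitChar k.toNat ∈ Nat.toDigits 10 m) := by
  induction m using Nat.strong_induction_on with
  | _ m ih =>
    rw [hasDigitLoop]
    have hmpos : (m : Int) > 0 := by exact_mod_cast hm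
    simp only [hmpos, dif_pos]
    have hmod : PySem.Int.mod (m : Int) 10 = ((m % 10 : Nat) : Int) := by
      simp [PySem.Int.mod, Int.fmod_eq_emod]
    have hdiv : PySem.Int.floordiv (m : Int) 10 = ((m / 10 : Nat) : Int) := by
      simp [PySem.Int.floordiv, Int.fdiv_eq_ediv]
    have hinj := (pvDigitChar_inj k.toNat (by omega) (m % 10) (by omega))
    rw [hmod, hdiv]
    by_cases heq : (m % 10 : Nat) = k.toNat
    · have hbeq : ((((m % 10 : Nat) : Int)) == k) = true := by
        simp only [beq_iff_eq]; omega
      simp only [hbeq, if_true]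
      have hdig : Nat.digitChar k.toNat = Nat.digitChar (m % 10) := hinj.mpr heq.symm
      by_cases hsmall : m < 10
      · rw [pvToDigits_small m hsmall]; simp [hdig]
      · rw [pvToDigits_step m (by omega)]; simp [hdig]
    · have hbeq : ((((m % 10 : Nat) : Int)) == k) = false := by
        simp only [beq_eq_false_iff_ne, ne_eq]; omega
      simp only [hbeq]
      have hdig : ¬ Nat.digitChar k.toNat = Nat.digitChar (m % 10) :=
        fun hc => heq (hinj.mp hc).symm
      by_cases hsmall : m < 10
      · have h0 : m / 10 = 0 := by omega
        rw [h0, pvToDigits_small m hsmall, hasDigitLoop]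
        rw [dif_neg (by omega : ¬ ((0 : Nat) : Int) > 0)]
        simp [hdig]
      · rw [pvToDigits_step m (by omega)]
        rw [ih (m / 10) (by omega) (by omega)]
        simp [hdig]

-- str(k) for 0 ≤ k < 10 is the single digit character
theorem pvToChars_digit (k : Int) (hk0 : 0 ≤ k) (hk : k < 10) :
    PySem.Int.toChars k = [Nat.digitChar k.toNat] := by
  have : ¬ k < 0 := by omega
  simp only [PySem.Int.toChars, this, if_false]
  rw [pvToDigits_small k.toNat (by omega), Nat.mod_eq_of_lt (by omega)]

-- ===== VERDICT (by name: the statement is the Claim_ definition above) =====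
theorem has_digit_spec : Claim_equal_has_digit := by
  intro n k _ hpre
  obtain ⟨hk0, hk⟩ := hpre
  show has_digit n k = has_digit_alt n k
  unfold has_digit has_digit_alt
  by_cases hn : n > 0
  · obtain ⟨m, rfl⟩ : ∃ m : Nat, n = (m : Int) := ⟨n.toNat, by omega⟩
    have hm : 0 < m := by exact_mod_cast hn
    have hmem : PySem.Str.isIn (PySem.Int.toStr k) (PySem.Int.toStr (m : Int))
        = decide (Nat.digitChar k.toNat ∈ Nat.toDigits 10 m) := by
      rw [Bool.eq_iff_iff, PySem.Str.isIn_iff_infix]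
      simp only [PySem.Int.toStr, decide_eq_true_eq]
      rw [pvToChars_digit k hk0 hk]
      have hnn : ¬ (m : Int) < 0 := by omega
      simp only [PySem.Int.toChars, hnn, if_false, String.toList_ofList]
      rw [List.singleton_infix_iff]
      simp
    rw [hmem, pvLoop_eq_mem m k hm hk0 hk]
    simp only [hn, decide_true, Bool.true_and]
  · rw [hasDigitLoop]
    simp [hn]
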